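-- pv_equiv track=rewrite | github.com/cn2671/kidlit | scripts/core/lexile_utils.py | get_lexile_range_label
-- ===== SOURCE A (Python) =====
-- LEXILE_RANGE_LABELS = {
--     (0, 200): "BR-200L (Ages 3-5)",
--     (200, 400): "200-400L (Ages 5-7)",
--     (400, 600): "400-600L (Ages 6-8)",
--     (600, 800): "600-800L (Ages 8-10)",
--     (800, 1000): "800-1000L (Ages 10-12)",
--     (1000, 1500): "1000L+ (Ages 12+)",
-- }
--
-- def get_lexile_range_label(lexile_score: int) -> str:
--     """Get descriptive label for a Lexile score"""
--
--     for (min_score, max_score), label in LEXILE_RANGE_LABELS.items():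
--         if min_score <= lexile_score <= max_score:
--             return label
--
--     # Fallback for scores outside normal ranges
--     if lexile_score < 50:
--         return "BR (Below Reader)"
--     elif lexile_score > 1500:
--         return "1500L+ (Advanced)"
--     else:
--         return f"{lexile_score}L"
-- ===== SOURCE B (Python) =====
-- import bisect
--
-- _UPPERS = [200, 400, 600, 800, 1000, 1500]
-- _LABELS = [
--     "BR-200L (Ages 3-5)",
--     "200-400L (Ages 5-7)",
--     "400-600L (Ages 6-8)",
--     "600-800L (Ages 8-10)",
--     "800-1000L (Ages 10-12)",
--     "1000L+ (Ages 12+)",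
-- ]
--
-- def get_lexile_range_label(lexile_score: int) -> str:
--     """Get descriptive label for a Lexile score"""
--     if lexile_score < 0:
--         return "BR (Below Reader)"
--     if lexile_score > 1500:
--         return "1500L+ (Advanced)"
--     return _LABELS[bisect.bisect_left(_UPPERS, lexile_score)]
-- ===== Notes on version B (the rewrite author's own statement) =====
-- stated objective: idiomatic
-- what changed: Replaces the sequential scan over (min,max)->label dict entries plus a three-way fallback chain by two range guards and a bisect_left lookup into a sorted upper-bound table parallel to a label list.
import Mathlib
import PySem

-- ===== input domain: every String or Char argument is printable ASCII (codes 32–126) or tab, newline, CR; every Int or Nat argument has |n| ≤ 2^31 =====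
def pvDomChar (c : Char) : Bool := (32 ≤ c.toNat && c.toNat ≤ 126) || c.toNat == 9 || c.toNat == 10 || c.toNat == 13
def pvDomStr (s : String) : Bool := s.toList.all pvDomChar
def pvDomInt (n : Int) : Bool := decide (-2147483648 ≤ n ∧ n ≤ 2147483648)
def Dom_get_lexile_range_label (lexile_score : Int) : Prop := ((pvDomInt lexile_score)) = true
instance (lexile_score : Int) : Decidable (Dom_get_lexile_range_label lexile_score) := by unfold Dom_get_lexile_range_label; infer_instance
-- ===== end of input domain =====

-- B replaces A's sequential scan over (min,max)→label pairs by two guards plus a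
-- bisect_left lookup into a sorted upper-bound table (objective: idiomatic).

-- ===== PORT A =====
-- the module-level dict, as an association list in insertion order
def LEXILE_RANGE_LABELS : List ((Int × Int) × String) :=
  [((0, 200), "BR-200L (Ages 3-5)"),
   ((200, 400), "200-400L (Ages 5-7)"),
   ((400, 600), "400-600L (Ages 6-8)"),
   ((600, 800), "600-800L (Ages 8-10)"),
   ((800, 1000), "800-1000L (Ages 10-12)"),
   ((1000, 1500), "1000L+ (Ages 12+)")]

-- the for-loop with early return: first pair whose range contains the score
def lexileLoop (items : List ((Int × Int) × String)) (s : Int) : Option String :=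
  match items with
  | [] => none
  | ((mn, mx), label) :: rest =>
      if mn ≤ s ∧ s ≤ mx then some label else lexileLoop rest s

def get_lexile_range_label (lexile_score : Int) : String :=
  match lexileLoop LEXILE_RANGE_LABELS lexile_score with
  | some label => label
  | none =>
      if lexile_score < 50 then "BR (Below Reader)"
      else if lexile_score > 1500 then "1500L+ (Advanced)"
      else PySem.Int.toStr lexile_score ++ "L"

-- ===== PORT B =====
def lexUppers : List Int := [200, 400, 600, 800, 1000, 1500]
def lexLabels : List String :=
  ["BR-200L (Ages 3-5)", "200-400L (Ages 5-7)", "400-600L (Ages 6-8)",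
   "600-800L (Ages 8-10)", "800-1000L (Ages 10-12)", "1000L+ (Ages 12+)"]

-- bisect.bisect_left on a sorted list = number of elements strictly below the key
def get_lexile_range_label_alt (lexile_score : Int) : String :=
  if lexile_score < 0 then "BR (Below Reader)"
  else if lexile_score > 1500 then "1500L+ (Advanced)"
  else lexLabels.getD (lexUppers.countP (· < lexile_score)) ""

-- ===== PRECONDITION & SPEC =====
def Spec_get_lexile_range_label (lexile_score : Int) (out : String) : Prop := out = get_lexile_range_label_alt lexile_score
instance (lexile_score : Int) (out : String) : Decidable (Spec_get_lexile_range_label lexile_score out) := by unfold Spec_get_lexile_range_label; infer_instance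

-- ===== CLAIM (what is proved, stated in full; the proofs are below) =====
def Claim_equal_get_lexile_range_label : Prop := ∀ (lexile_score : Int), Dom_get_lexile_range_label lexile_score → Spec_get_lexile_range_label lexile_score (get_lexile_range_label lexile_score)

-- ===== LEMMAS AND PROOFS =====

-- ===== VERDICT (by name: the statement is the Claim_ definition above) =====
theorem get_lexile_range_label_spec : Claim_equal_get_lexile_range_label := by
  intro s _
  unfold Spec_get_lexile_range_label get_lexile_range_label get_lexile_range_label_alt
  simp only [LEXILE_RANGE_LABELS, lexileLoop, lexUppers, lexLabels, List.countP,
    List.countP.go, List.getD, Bool.cond_decide]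
  have hc : s < 0 ∨ (0 ≤ s ∧ s ≤ 200) ∨ (200 < s ∧ s ≤ 400) ∨ (400 < s ∧ s ≤ 600) ∨ (600 < s ∧ s ≤ 800) ∨ (800 < s ∧ s ≤ 1000) ∨ (1000 < s ∧ s ≤ 1500) ∨ 1500 < s := by omega
  rcases hc with h | ⟨h1,h2⟩ | ⟨h1,h2⟩ | ⟨h1,h2⟩ | ⟨h1,h2⟩ | ⟨h1,h2⟩ | ⟨h1,h2⟩ | h
  · simp only [show ¬(0 ≤ s ∧ s ≤ 200) by omega, show ¬(200 ≤ s ∧ s ≤ 400) by omega, show ¬(400 ≤ s ∧ s ≤ 600) by omega, show ¬(600 ≤ s ∧ s ≤ 800) by omega, show ¬(800 ≤ s ∧ s ≤ 1000) by omega, show ¬(1000 ≤ s ∧ s ≤ 1500) by omega, show s < 0 by omega, show ¬(s > 1500) by omega, show s < 50 by omega, show ¬((200:Int) < s) by omega, show ¬((400:Int) < s) by omega, show ¬((600:Int) < s) by omega, show ¬((800:Int) < s) by omega, show ¬((1000:Int) < s) by omega, show ¬((1500:Int) < s) by omega, if_true, if_false, not_false_eq_true, not_true_eq_false, reduceIt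e]
    try rfl
  · simp only [show (0 ≤ s ∧ s ≤ 200) from ⟨by omega, by omega⟩, show ¬(400 ≤ s ∧ s ≤ 600) by omega, show ¬(600 ≤ s ∧ s ≤ 800) by omega, show ¬(800 ≤ s ∧ s ≤ 1000) by omega, show ¬(1000 ≤ s ∧ s ≤ 1500) by omega, show ¬(s < 0) by omega, show ¬(s > 1500) by omega, show ¬((200:Int) < s) by omega, show ¬((400:Int) < s) by omega, show ¬((600:Int) < s) by omega, show ¬((800:Int) < s) by omega, show ¬((1000:Int) < s) by omega, show ¬((1500:Int) < s) by omega, if_true, if_false, not_false_eq_true, not_true_eq_false, reduceIte]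
    try rfl
  · simp only [show ¬(0 ≤ s ∧ s ≤ 200) by omega, show (200 ≤ s ∧ s ≤ 400) from ⟨by omega, by omega⟩, show ¬(600 ≤ s ∧ s ≤ 800) by omega, show ¬(800 ≤ s ∧ s ≤ 1000) by omega, show ¬(1000 ≤ s ∧ s ≤ 1500) by omega, show ¬(s < 0) by omega, show ¬(s > 1500) by omega, show ¬(s < 50) by omega, show (200:Int) < s by omega, show ¬((400:Int) < s) by omega, show ¬((600:Int) < s) by omega, show ¬((800:Int) < s) by omega, show ¬((1000:Int) < s) by omega, show ¬((1500:Int) < s) by omega, if_true, if_false, not_false_eq_true, not_true_eq_false, reduceIte]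
    try rfl
  · simp only [show ¬(0 ≤ s ∧ s ≤ 200) by omega, show ¬(200 ≤ s ∧ s ≤ 400) by omega, show (400 ≤ s ∧ s ≤ 600) from ⟨by omega, by omega⟩, show ¬(800 ≤ s ∧ s ≤ 1000) by omega, show ¬(1000 ≤ s ∧ s ≤ 1500) by omega, show ¬(s < 0) by omega, show ¬(s > 1500) by omega, show ¬(s < 50) by omega, show (200:Int) < s by omega, show (400:Int) < s by omega, show ¬((600:Int) < s) by omega, show ¬((800:Int) < s) by omega, show ¬((1000:Int) < s) by omega, show ¬((1500:Int) < s) by omega, if_true, if_false, not_false_eq_true, not_true_eq_false, reduceIte]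
    try rfl
  · simp only [show ¬(0 ≤ s ∧ s ≤ 200) by omega, show ¬(200 ≤ s ∧ s ≤ 400) by omega, show ¬(400 ≤ s ∧ s ≤ 600) by omega, show (600 ≤ s ∧ s ≤ 800) from ⟨by omega, by omega⟩, show ¬(1000 ≤ s ∧ s ≤ 1500) by omega, show ¬(s < 0) by omega, show ¬(s > 1500) by omega, show ¬(s < 50) by omega, show (200:Int) < s by omega, show (400:Int) < s by omega, show (600:Int) < s by omega, show ¬((800:Int) < s) by omega, show ¬((1000:Int) < s) by omega, show ¬((1500:Int) < s) by omega, if_true, if_false, not_false_eq_true, not_true_eq_false, reduceIte]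
    try rfl
  · simp only [show ¬(0 ≤ s ∧ s ≤ 200) by omega, show ¬(200 ≤ s ∧ s ≤ 400) by omega, show ¬(400 ≤ s ∧ s ≤ 600) by omega, show ¬(600 ≤ s ∧ s ≤ 800) by omega, show (800 ≤ s ∧ s ≤ 1000) from ⟨by omega, by omega⟩, show ¬(s < 0) by omega, show ¬(s > 1500) by omega, show ¬(s < 50) by omega, show (200:Int) < s by omega, show (400:Int) < s by omega, show (600:Int) < s by omega, show (800:Int) < s by omega, show ¬((1000:Int) < s) by omega, show ¬((1500:Int) < s) by omega, if_true, if_false, not_false_eq_true, not_true_eq_false, reduceIte]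
    try rfl
  · simp only [show ¬(0 ≤ s ∧ s ≤ 200) by omega, show ¬(200 ≤ s ∧ s ≤ 400) by omega, show ¬(400 ≤ s ∧ s ≤ 600) by omega, show ¬(600 ≤ s ∧ s ≤ 800) by omega, show ¬(800 ≤ s ∧ s ≤ 1000) by omega, show (1000 ≤ s ∧ s ≤ 1500) from ⟨by omega, by omega⟩, show ¬(s < 0) by omega, show ¬(s > 1500) by omega, show ¬(s < 50) by omega, show (200:Int) < s by omega, show (400:Int) < s by omega, show (600:Int) < s by omega, show (800:Int) < s by omega, show (1000:Int) < s by omega, show ¬((1500:Int) < s) by omega, if_true, if_false, not_false_eq_true, not_true_eq_false, reduceIte]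
    try rfl
  · simp only [show ¬(0 ≤ s ∧ s ≤ 200) by omega, show ¬(200 ≤ s ∧ s ≤ 400) by omega, show ¬(400 ≤ s ∧ s ≤ 600) by omega, show ¬(600 ≤ s ∧ s ≤ 800) by omega, show ¬(800 ≤ s ∧ s ≤ 1000) by omega, show ¬(1000 ≤ s ∧ s ≤ 1500) by omega, show ¬(s < 0) by omega, show s > 1500 by omega, show ¬(s < 50) by omega, show (200:Int) < s by omega, show (400:Int) < s by omega, show (600:Int) < s by omega, show (800:Int) < s by omega, show (1000:Int) < s by omega, show (1500:Int) < s by omega, if_true, if_false, not_false_eq_true, not_true_eq_false, reduceIte]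
    try rfl
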